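-- pv_equiv track=rewrite | github.com/Vieira-zj/zj_new_py_app | pysort/py_alg_string.py | filter_aba_string
-- ===== SOURCE A (Python) =====
-- def filter_aba_string(aba_str: str) -> str:
--     '''
--     过滤掉输入字符串中的驼峰字符串（aba）
--     input: AaabxbcdyayBxxy
--     output: AaacdBxxy
--     '''
--     def is_aba_string(input_str):
--         return input_str[0] == input_str[2]
--
--     local_str = aba_str[:]
--     i = 0
--     while i < (len(local_str) - 2):
--         if is_aba_string(local_str[i:i+3]):
--             local_str = local_str[0:i] + local_str[i+3:]
--         else:
--             i += 1
--     return local_str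
-- ===== SOURCE B (Python) =====
-- def filter_aba_string(aba_str: str) -> str:
--     # Single left-to-right pass over the original string: no per-removal copying.
--     s = aba_str
--     n = len(s)
--     out = []
--     j = 0
--     while n - j >= 3:
--         if s[j] == s[j + 2]:
--             j += 3
--         else:
--             out.append(s[j])
--             j += 1
--     out.append(s[j:])
--     return ''.join(out)
-- ===== Notes on version B (the rewrite author's own statement) =====
-- stated objective: faster
-- what changed: B replaces A's quadratic rebuild-the-string-on-every-removal while loop with a single left-to-right pass that either skips 3 characters on a 3-char palindromic window (first char equals third) or emits one character, appending to a list joined once at the end.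
import Mathlib
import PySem

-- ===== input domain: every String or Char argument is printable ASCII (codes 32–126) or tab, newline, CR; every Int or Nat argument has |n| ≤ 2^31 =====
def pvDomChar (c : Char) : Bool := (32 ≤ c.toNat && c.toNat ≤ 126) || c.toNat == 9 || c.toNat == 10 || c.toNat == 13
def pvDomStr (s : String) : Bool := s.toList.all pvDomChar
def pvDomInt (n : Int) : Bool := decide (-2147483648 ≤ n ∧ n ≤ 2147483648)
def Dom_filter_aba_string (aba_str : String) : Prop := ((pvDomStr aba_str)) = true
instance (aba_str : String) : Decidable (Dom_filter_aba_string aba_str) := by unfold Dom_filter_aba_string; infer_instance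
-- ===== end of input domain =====

-- B replaces A's per-removal string rebuilding with one left-to-right pass appending chars (objective: faster, asymptotic).

-- ===== PORT A =====
-- A's while loop: state (local_str, i); on a 3-char palindromic window remove 3 chars by slicing, else i += 1.
-- fuel is only a totality guard: each iteration decreases local_str.length - i, which starts at the string's length.
def pvFilterAbaLoopA (fuel : Nat) (s : List Char) (i : Nat) : List Char :=
  match fuel with
  | 0 => s
  | fuel + 1 =>
    if (i : Int) < (s.length : Int) - 2 then
      -- is_aba_string(local_str[i:i+3]): compare chars 0 and 2 of the 3-char slice
      let w := PySem.List.slice s (some (i : Int)) (some ((i : Int) + 3))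
      if PySem.List.pyGet? w 0 = PySem.List.pyGet? w 2 then
        pvFilterAbaLoopA fuel (PySem.List.slice s (some 0) (some (i : Int)) ++
                               PySem.List.slice s (some ((i : Int) + 3)) none) i
      else
        pvFilterAbaLoopA fuel s (i + 1)
    else
      s

def filter_aba_string (aba_str : String) : String :=
  String.ofList (pvFilterAbaLoopA aba_str.toList.length aba_str.toList 0)

-- ===== PORT B =====
-- B's single pass: drop 3 chars on a 3-char palindromic window, else emit the first char and continue.
def pvFilterAbaGoB : List Char → List Char
  | a :: b :: c :: r => if a = c then pvFilterAbaGoB r else a :: pvFilterAbaGoB (b :: c :: r)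
  | s => s

def filter_aba_string_alt (aba_str : String) : String :=
  String.ofList (pvFilterAbaGoB aba_str.toList)

-- ===== PRECONDITION & SPEC =====
def Spec_filter_aba_string (aba_str : String) (out : String) : Prop := out = filter_aba_string_alt aba_str
instance (aba_str : String) (out : String) : Decidable (Spec_filter_aba_string aba_str out) := by unfold Spec_filter_aba_string; infer_instance

-- ===== CLAIM (what is proved, stated in full; the proofs are below) =====
def Claim_equal_filter_aba_string : Prop := ∀ (aba_str : String), Dom_filter_aba_string aba_str → Spec_filter_aba_string aba_str (filter_aba_string aba_str)

-- ===== LEMMAS AND PROOFS =====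

lemma pvFilterAbaGoB_short (s : List Char) (h : s.length < 3) : pvFilterAbaGoB s = s := by
  match s, h with
  | [], _ => rfl
  | [a], _ => rfl
  | [a, b], _ => rfl

lemma pvFilterAbaLoopA_eq (fuel : Nat) (s : List Char) (i : Nat) (hi : i ≤ s.length)
    (hf : s.length - i ≤ fuel) :
    pvFilterAbaLoopA fuel s i = s.take i ++ pvFilterAbaGoB (s.drop i) := by
  induction fuel generalizing s i with
  | zero =>
    -- no iterations possible: i = s.length, nothing remains
    have hi' : i = s.length := by omega
    simp [pvFilterAbaLoopA, hi', pvFilterAbaGoB]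
  | succ fuel ih =>
    by_cases h : (i : Int) < (s.length : Int) - 2
    · have hlen : i + 2 < s.length := by omega
      obtain ⟨a, b, c, r, hd⟩ : ∃ a b c r, s.drop i = a :: b :: c :: r := by
        have h3 : 3 ≤ (s.drop i).length := by simp only [List.length_drop]; omega
        match hds : s.drop i, h3 with
        | a :: b :: c :: r, _ => exact ⟨a, b, c, r, rfl⟩
      have hsl3 : PySem.List.slice s (some (i : Int)) (some ((i : Int) + 3)) = [a, b, c] := by
        rw [PySem.List.slice_toNat s (a := (i : Int)) (b := (i : Int) + 3) (by omega) (by omega)]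
        have e1 : ((i : Int) + 3).toNat - ((i : Int)).toNat = 3 := by omega
        have e2 : ((i : Int)).toNat = i := by omega
        rw [e1, e2, hd]; rfl
      have hsl0 : PySem.List.slice s (some 0) (some (i : Int)) = s.take i := by
        rw [PySem.List.slice_toNat s (a := 0) (b := (i : Int)) (by omega) (by omega)]
        simp
      have hslf : PySem.List.slice s (some ((i : Int) + 3)) none = s.drop (i + 3) := by
        rw [PySem.List.slice_from s (by omega)]
        have e : ((i : Int) + 3).toNat = i + 3 := by omega
        rw [e]
      rw [pvFilterAbaLoopA]
      simp only [h, if_pos]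
      rw [hsl3, hsl0, hslf]
      by_cases hac : a = c
      · -- 3-char palindromic window found at i: A removes s[i:i+3]
        have hcond : PySem.List.pyGet? [a, b, c] 0 = PySem.List.pyGet? [a, b, c] 2 := by
          simp [PySem.List.pyGet?, PySem.List.pyIdx?, hac]
        rw [if_pos hcond]
        have hlen' : i ≤ (s.take i ++ s.drop (i + 3)).length := by
          simp only [List.length_append, List.length_take, List.length_drop]; omega
        have hf' : (s.take i ++ s.drop (i + 3)).length - i ≤ fuel := by
          simp only [List.length_append, List.length_take, List.length_drop]; omega
        rw [ih _ _ hlen' hf']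
        have htake : (s.take i ++ s.drop (i + 3)).take i = s.take i := by
          rw [List.take_append_of_le_length (by simp only [List.length_take]; omega)]
          simp [List.take_take]
        have hdrop : (s.take i ++ s.drop (i + 3)).drop i = s.drop (i + 3) := by
          rw [List.drop_append_of_le_length (by simp only [List.length_take]; omega)]
          simp
        rw [htake, hdrop, hd]
        have hr : s.drop (i + 3) = r := by
          have e : s.drop (i + 3) = (s.drop i).drop 3 := by rw [List.drop_drop]
          rw [e, hd]; rfl
        rw [hr]
        simp [pvFilterAbaGoB, hac]
      · -- no 3-char palindromic window at i: A advances i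
        have hcond : ¬ (PySem.List.pyGet? [a, b, c] 0 = PySem.List.pyGet? [a, b, c] 2) := by
          simp [PySem.List.pyGet?, PySem.List.pyIdx?, hac]
        rw [if_neg hcond]
        rw [ih _ _ (by omega) (by omega)]
        have ha : s[i]? = some a := by
          rw [← List.head?_drop, hd]; rfl
        have hdrop1 : s.drop (i + 1) = b :: c :: r := by
          have e : s.drop (i + 1) = (s.drop i).drop 1 := by rw [List.drop_drop]
          rw [e, hd]; rfl
        rw [List.take_add_one, hdrop1, hd]
        simp [pvFilterAbaGoB, hac, ha]
    · -- loop guard false: fewer than 3 chars remain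
      rw [pvFilterAbaLoopA]
      simp only [h]
      rw [pvFilterAbaGoB_short _ (by simp only [List.length_drop]; omega)]
      simp

-- ===== VERDICT (by name: the statement is the Claim_ definition above) =====
theorem filter_aba_string_spec : Claim_equal_filter_aba_string := by
  intro s _
  show _ = _
  unfold filter_aba_string filter_aba_string_alt
  rw [pvFilterAbaLoopA_eq s.toList.length s.toList 0 (by omega) (by omega)]
  simp
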